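-- pv_equiv track=rewrite | github.com/pilerbaig/6.1010 | sat/lab.py | row_rule
-- ===== SOURCE A (Python) =====
-- def row_rule(sudoku_board):
--     """
--     Rule that states that there must be one of each number
--     in each row of the board.
--     """
--     sub_formula = []
--     dim = len(sudoku_board)
--
--     for row in range(dim):
--         for num in range(1, dim + 1):
--             num_clause = []
--             for col in range(dim):
--                 cols = list(range(dim))
--                 pairs = get_pairs(cols)
--                 num_clause.append(((row, col, num), True))
--                 pair_check = []
--                 for pair in pairs:
--                     pair_check.append(
--                         [((row, pair[0], num), False), ((row, pair[1], num), False)]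
--                     )
--             sub_formula.append(num_clause)
--             sub_formula.extend(pair_check)
--     return sub_formula
--
-- def get_pairs(entry_list):
--     """
--     From a list of entries, returns a list of all possible pairs
--     (without duplicates).
--     """
--     pairs_list = []
--     for entry in entry_list:
--         for entry2 in entry_list:
--             if entry2 != entry and [entry2, entry] not in pairs_list:
--                 pairs_list.append([entry, entry2])
--     return pairs_list
-- ===== SOURCE B (Python) =====
-- def row_rule(sudoku_board):
--     """
--     Rule that states that there must be one of each number
--     in each row of the board.  Pairs of columns are computed once,
--     directly in increasing order, instead of per-column with a
--     quadratic membership scan.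
--     """
--     dim = len(sudoku_board)
--     pairs = [(i, j) for i in range(dim) for j in range(i + 1, dim)]
--     formula = []
--     for row in range(dim):
--         for num in range(1, dim + 1):
--             formula.append([((row, col, num), True) for col in range(dim)])
--             formula.extend(
--                 [((row, i, num), False), ((row, j, num), False)] for (i, j) in pairs
--             )
--     return formula
-- ===== Notes on version B (the rewrite author's own statement) =====
-- stated objective: faster
-- what changed: B generates the column pairs once, directly in increasing lexicographic order, instead of recomputing get_pairs (a double loop with a quadratic reversed-pair membership scan) inside the column loop for every row/num/col.
import Mathlib
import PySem

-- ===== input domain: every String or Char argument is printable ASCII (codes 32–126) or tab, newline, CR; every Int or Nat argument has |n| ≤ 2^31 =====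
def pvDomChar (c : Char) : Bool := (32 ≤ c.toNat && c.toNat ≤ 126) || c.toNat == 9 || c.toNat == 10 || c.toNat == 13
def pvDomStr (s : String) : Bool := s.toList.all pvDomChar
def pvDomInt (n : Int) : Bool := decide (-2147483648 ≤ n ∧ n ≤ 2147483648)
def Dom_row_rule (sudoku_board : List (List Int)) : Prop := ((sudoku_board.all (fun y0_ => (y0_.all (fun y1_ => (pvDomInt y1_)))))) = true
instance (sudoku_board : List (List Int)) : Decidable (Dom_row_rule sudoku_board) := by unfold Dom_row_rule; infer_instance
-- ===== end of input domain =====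

-- B precomputes the column pairs once in increasing order instead of recomputing
-- get_pairs (quadratic membership scan) inside the column loop: asymptotically faster.

-- ===== PORT A =====
-- helper get_pairs of A, transliterated (Python's 2-element list [a, b] as the pair (a, b))
def get_pairs (entry_list : List Int) : List (Int × Int) :=
  entry_list.foldl (fun pairs_list entry =>
    entry_list.foldl (fun pl entry2 =>
      if entry2 ≠ entry ∧ (entry2, entry) ∉ pl then pl ++ [(entry, entry2)] else pl)
      pairs_list) []

def row_rule (sudoku_board : List (List Int)) : List (List ((Int × Int × Int) × Bool)) :=
  let dim : Int := sudoku_board.length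
  (PySem.List.pyRange 0 dim 1).foldl (fun sub_formula row =>
    (PySem.List.pyRange 1 (dim + 1) 1).foldl (fun sub_formula num =>
      -- the col loop carries num_clause (accumulated) and pair_check (reset each iteration)
      let st := (PySem.List.pyRange 0 dim 1).foldl
        (fun (st : List ((Int × Int × Int) × Bool) × List (List ((Int × Int × Int) × Bool))) col =>
          let cols := PySem.List.pyRange 0 dim 1
          let pairs := get_pairs cols
          let num_clause := st.1 ++ [((row, col, num), true)]
          let pair_check := pairs.foldl (fun pc pair =>
            pc ++ [[((row, pair.1, num), false), ((row, pair.2, num), false)]]) []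
          (num_clause, pair_check)) ([], [])
      (sub_formula ++ [st.1]) ++ st.2) sub_formula) []

-- ===== PORT B =====
def row_rule_alt (sudoku_board : List (List Int)) : List (List ((Int × Int × Int) × Bool)) :=
  let dim : Int := sudoku_board.length
  let pairs := (PySem.List.pyRange 0 dim 1).flatMap
    (fun i => (PySem.List.pyRange (i + 1) dim 1).map (fun j => (i, j)))
  (PySem.List.pyRange 0 dim 1).foldl (fun formula row =>
    (PySem.List.pyRange 1 (dim + 1) 1).foldl (fun formula num =>
      (formula ++ [(PySem.List.pyRange 0 dim 1).map (fun col => ((row, col, num), true))])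
        ++ pairs.map (fun p => [((row, p.1, num), false), ((row, p.2, num), false)]))
      formula) []

-- ===== PRECONDITION & SPEC =====
def Spec_row_rule (sudoku_board : List (List Int)) (out : List (List ((Int × Int × Int) × Bool))) : Prop := out = row_rule_alt sudoku_board
instance (sudoku_board : List (List Int)) (out : List (List ((Int × Int × Int) × Bool))) : Decidable (Spec_row_rule sudoku_board out) := by unfold Spec_row_rule; infer_instance

-- ===== CLAIM (what is proved, stated in full; the proofs are below) =====
def Claim_equal_row_rule : Prop := ∀ (sudoku_board : List (List Int)), Dom_row_rule sudoku_board → Spec_row_rule sudoku_board (row_rule sudoku_board)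

-- ===== LEMMAS AND PROOFS =====

-- the inner- and outer-loop step functions of get_pairs, named for the proofs
def gpStep (entry : Int) (pl : List (Int × Int)) (entry2 : Int) : List (Int × Int) :=
  if entry2 ≠ entry ∧ (entry2, entry) ∉ pl then pl ++ [(entry, entry2)] else pl

def gpOuter (S : List Int) (pl : List (Int × Int)) (e : Int) : List (Int × Int) :=
  S.foldl (gpStep e) pl

theorem get_pairs_eq_foldl (L : List Int) :
    get_pairs L = L.foldl (gpOuter L) [] := rfl

-- inner fold with a prefix none of whose pairs can be hit by the membership test
theorem gp_inner_prefix (e : Int) (M : List Int) (P acc : List (Int × Int))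
    (h : ∀ e2 ∈ M, (e2, e) ∉ P) :
    M.foldl (gpStep e) (P ++ acc) = P ++ M.foldl (gpStep e) acc := by
  induction M generalizing acc with
  | nil => rfl
  | cons x M ih =>
    have hx : (x, e) ∉ P := h x (by simp)
    rw [List.foldl_cons, List.foldl_cons]
    by_cases hc : x ≠ e ∧ (x, e) ∉ acc
    · have h1 : gpStep e (P ++ acc) x = P ++ (acc ++ [(e, x)]) := by
        simp only [gpStep, List.mem_append, hx]
        rw [if_pos ⟨hc.1, by simp [hc.2]⟩, List.append_assoc]
      have h2 : gpStep e acc x = acc ++ [(e, x)] := by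
        simp only [gpStep]; rw [if_pos hc]
      rw [h1, h2]
      exact ih (acc ++ [(e, x)]) (fun e2 h2 => h e2 (by simp [h2]))
    · have h1 : gpStep e (P ++ acc) x = P ++ acc := by
        simp only [gpStep]
        rw [if_neg (by rintro ⟨hne, hnm⟩; exact hc ⟨hne, fun hm => hnm (by simp [hm])⟩)]
      have h2 : gpStep e acc x = acc := by
        simp only [gpStep]; rw [if_neg hc]
      rw [h1, h2]
      exact ih acc (fun e2 h2 => h e2 (by simp [h2]))

-- first pass: all elements differ from h and acc's firsts all equal h ⇒ every pair appended
theorem gp_inner_all_append (h : Int) (M : List Int) (acc : List (Int × Int))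
    (hM : ∀ e2 ∈ M, e2 ≠ h) (hacc : ∀ p ∈ acc, p.1 = h) :
    M.foldl (gpStep h) acc = acc ++ M.map (fun x => (h, x)) := by
  induction M generalizing acc with
  | nil => simp
  | cons x M ih =>
    have hx : x ≠ h := hM x (by simp)
    have hnm : (x, h) ∉ acc := by
      intro hmem
      exact hx (hacc (x, h) hmem)
    rw [List.foldl_cons]
    have hstep : gpStep h acc x = acc ++ [(h, x)] := by
      simp only [gpStep]; rw [if_pos ⟨hx, hnm⟩]
    rw [hstep, ih (acc ++ [(h, x)]) (fun e2 h2 => hM e2 (by simp [h2]))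
        (by intro p hp
            rcases List.mem_append.1 hp with hp | hp
            · exact hacc p hp
            · simp at hp; simp [hp])]
    simp

-- one outer pass over h :: L for an entry e ∈ L, with prefix P = L.map (h, ·)
theorem gp_inner_cons (h e : Int) (L : List Int) (acc : List (Int × Int))
    (heL : e ∈ L) (hhL : h ∉ L) :
    gpOuter (h :: L) (L.map (fun x => (h, x)) ++ acc) e
      = L.map (fun x => (h, x)) ++ gpOuter L acc e := by
  unfold gpOuter
  rw [List.foldl_cons]
  have hskip : gpStep e (L.map (fun x => (h, x)) ++ acc) h
      = L.map (fun x => (h, x)) ++ acc := by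
    simp only [gpStep]
    rw [if_neg (by
      rintro ⟨_, hnm⟩
      exact hnm (List.mem_append.2 (Or.inl (List.mem_map.2 ⟨e, heL, rfl⟩))))]
  rw [hskip]
  exact gp_inner_prefix e L _ acc
    (fun e2 h2 hmem => by
      rcases List.mem_map.1 hmem with ⟨x, _, hx⟩
      exact hhL ((Prod.mk.injEq .. ▸ hx).1 ▸ h2))

-- the remaining outer folds over M ⊆ L commute with the prefix
theorem gp_outer_prefix (h : Int) (L M : List Int) (acc : List (Int × Int))
    (hML : ∀ e ∈ M, e ∈ L) (hhL : h ∉ L) :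
    M.foldl (gpOuter (h :: L)) (L.map (fun x => (h, x)) ++ acc)
      = L.map (fun x => (h, x)) ++ M.foldl (gpOuter L) acc := by
  induction M generalizing acc with
  | nil => rfl
  | cons e M ih =>
    rw [List.foldl_cons, List.foldl_cons,
        gp_inner_cons h e L acc (hML e (by simp)) hhL]
    exact ih _ (fun x hx => hML x (by simp [hx]))

theorem get_pairs_cons (h : Int) (L : List Int) (hhL : h ∉ L) :
    get_pairs (h :: L) = L.map (fun x => (h, x)) ++ get_pairs L := by
  rw [get_pairs_eq_foldl, get_pairs_eq_foldl, List.foldl_cons]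
  have h0 : gpOuter (h :: L) [] h = L.map (fun x => (h, x)) := by
    unfold gpOuter
    rw [List.foldl_cons]
    have : gpStep h ([] : List (Int × Int)) h = [] := by simp [gpStep]
    rw [this, gp_inner_all_append h L []
      (fun e2 he2 heq => hhL (heq ▸ he2)) (by simp)]
    simp
  rw [h0]
  have := gp_outer_prefix h L L [] (fun _ hx => hx) hhL
  simpa using this

-- characterisation of get_pairs on an integer range: lexicographic increasing pairs
theorem get_pairs_pyRange (a b : Int) :
    get_pairs (PySem.List.pyRange a b 1)
      = (PySem.List.pyRange a b 1).flatMap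
          (fun i => (PySem.List.pyRange (i + 1) b 1).map (fun j => (i, j))) := by
  by_cases hab : a < b
  · rw [PySem.List.pyRange_one_cons hab]
    have hnot : a ∉ PySem.List.pyRange (a + 1) b 1 := by
      intro hmem
      have := (PySem.List.mem_pyRange_one).1 hmem
      omega
    rw [get_pairs_cons a _ hnot, get_pairs_pyRange (a + 1) b]
    simp
  · rw [PySem.List.pyRange_one_eq_nil (by omega)]
    simp [get_pairs]
termination_by (b - a).toNat
decreasing_by omega

-- A's column loop: num_clause accumulates; pair_check is rebuilt, identically, each iteration
theorem col_fold {α β : Type} (g : Int → α) (Kv : β) (C : List Int) (nc0 : List α) (pc0 : β) :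
    C.foldl (fun st col => (st.1 ++ [g col], Kv)) (nc0, pc0)
      = (nc0 ++ C.map g, if C.isEmpty then pc0 else Kv) := by
  induction C generalizing nc0 pc0 with
  | nil => simp
  | cons c C ih =>
    simp only [List.foldl_cons]
    rw [ih]
    cases C <;> simp

-- the foldl-append loop building pair_check is a map
theorem pair_check_map (row num : Int) (ps : List (Int × Int))
    (acc : List (List ((Int × Int × Int) × Bool))) :
    ps.foldl (fun pc pair =>
        pc ++ [[((row, pair.1, num), false), ((row, pair.2, num), false)]]) acc
      = acc ++ ps.map (fun p => [((row, p.1, num), false), ((row, p.2, num), false)]) := by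
  induction ps generalizing acc with
  | nil => simp
  | cons p ps ih => simp [ih]

-- ===== VERDICT (by name: the statement is the Claim_ definition above) =====
theorem row_rule_spec : Claim_equal_row_rule := by
  intro b _
  unfold Spec_row_rule row_rule row_rule_alt
  dsimp only
  by_cases hb : (b.length : Int) ≤ 0
  · rw [PySem.List.pyRange_one_eq_nil hb]
    simp
  · push Not at hb
    apply List.foldl_ext
    intro sf row _
    apply List.foldl_ext
    intro sf' num _
    rw [col_fold (fun col => ((row, col, num), true))
        ((get_pairs (PySem.List.pyRange 0 (b.length : Int) 1)).foldl (fun pc pair =>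
          pc ++ [[((row, pair.1, num), false), ((row, pair.2, num), false)]]) [])
        (PySem.List.pyRange 0 (b.length : Int) 1) [] []]
    rw [pair_check_map, get_pairs_pyRange]
    have hne : (PySem.List.pyRange 0 (b.length : Int) 1).isEmpty = false := by
      rw [PySem.List.pyRange_one_cons hb]; rfl
    rw [hne]
    simp
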